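-- pv_equiv track=rewrite | github.com/tmose1106/misc_py_tools | metadata/album_art_paste.py | special_characters
-- ===== SOURCE A (Python) =====
-- def special_characters(a_string, replace_character):
--
--     """ This function removes special characters that take away from the
--     reading experience or which are not permitted to be used within a file
--     name.
--     """
--
--     mod_string = a_string
--     removal_list = ['<>:\'"/\\|?!* ']
--
--     for real_list in removal_list:
--         for character in real_list:
--             if character in mod_string:
--                 mod_string = mod_string.replace(str(character), '-')
--
--     return mod_string
-- ===== SOURCE B (Python) =====
-- def special_characters(a_string, replace_character):
--     """Single pass over a_string with a set of special characters; replace_character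
--     is ignored, exactly as in the original."""
--     specials = set('<>:\'"/\\|?!* ')
--     return ''.join('-' if c in specials else c for c in a_string)
-- ===== Notes on version B (the rewrite author's own statement) =====
-- stated objective: idiomatic
-- what changed: B makes one pass over the input testing set membership and joins the result, instead of A's loop over the special characters that rescans the whole string with str.replace for each one.
import Mathlib
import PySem

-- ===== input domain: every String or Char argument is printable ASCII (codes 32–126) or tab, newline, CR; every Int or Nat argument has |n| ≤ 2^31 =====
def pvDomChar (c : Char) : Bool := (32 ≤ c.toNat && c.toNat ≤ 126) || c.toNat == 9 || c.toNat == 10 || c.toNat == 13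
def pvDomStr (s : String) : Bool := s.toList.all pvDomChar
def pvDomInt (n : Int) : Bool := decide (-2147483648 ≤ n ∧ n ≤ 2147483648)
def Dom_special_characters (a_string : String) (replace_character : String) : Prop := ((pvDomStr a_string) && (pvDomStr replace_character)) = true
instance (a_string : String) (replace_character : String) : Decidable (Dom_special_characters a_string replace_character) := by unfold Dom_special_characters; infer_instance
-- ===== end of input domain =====

-- B replaces A's per-special-character str.replace rescans by one pass over the input with a set membership test (idiomatic; replace_character stays unused, as in A).

-- ===== PORT A =====
def special_characters (a_string : String) (replace_character : String) : String :=
  let removal_list : List String := ["<>:'\"/\\|?!* "]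
  removal_list.foldl (fun mod_string real_list =>
    real_list.toList.foldl (fun mod_string character =>
      if PySem.Str.isIn (String.ofList [character]) mod_string then
        PySem.Str.replace mod_string (String.ofList [character]) "-"
      else mod_string) mod_string) a_string

-- ===== PORT B =====
def special_characters_alt (a_string : String) (replace_character : String) : String :=
  let specials : PySem.Set Char := PySem.Set.ofList "<>:'\"/\\|?!* ".toList
  String.ofList (a_string.toList.map (fun c => if PySem.Set.contains specials c then '-' else c))

-- ===== PRECONDITION & SPEC =====
def Spec_special_characters (a_string : String) (replace_character : String) (out : String) : Prop := out = special_characters_alt a_string replace_character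
instance (a_string : String) (replace_character : String) (out : String) : Decidable (Spec_special_characters a_string replace_character out) := by unfold Spec_special_characters; infer_instance

-- ===== CLAIM (what is proved, stated in full; the proofs are below) =====
def Claim_equal_special_characters : Prop := ∀ (a_string : String) (replace_character : String), Dom_special_characters a_string replace_character → Spec_special_characters a_string replace_character (special_characters a_string replace_character)

-- ===== LEMMAS AND PROOFS =====

-- replace.go with a single-char pattern is a pointwise map (fuel suffices)
theorem pv_go_single (c : Char) (l acc : List Char) (fuel : Nat) (h : l.length ≤ fuel) :
    PySem.Chars.replace.go [c] ['-'] fuel l acc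
      = acc.reverse ++ l.map (fun x => if x = c then '-' else x) := by
  induction l generalizing acc fuel with
  | nil =>
      cases fuel <;> simp [PySem.Chars.replace.go]
  | cons a t ih =>
      cases fuel with
      | zero => simp at h
      | succ n =>
          rw [PySem.Chars.replace.go]
          by_cases hac : a = c
          · subst hac
            rw [if_pos (by simp [List.isPrefixOf])]
            simp only [List.length_cons, List.length_nil, List.drop_succ_cons, List.drop_zero,
              List.reverse_cons, List.reverse_nil, List.nil_append]
            rw [ih (['-'] ++ acc) n (Nat.le_of_succ_le_succ h)]
            simp
          · have hp : List.isPrefixOf [c] (a :: t) = false := by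
              simp [List.isPrefixOf]
              intro hh; exact hac hh.symm
            rw [if_neg (by simp [hp])]
            rw [ih (a :: acc) n (Nat.le_of_succ_le_succ h)]
            simp [hac]


theorem pv_replace_single (c : Char) (s : List Char) :
    PySem.Chars.replace s [c] ['-'] = s.map (fun x => if x = c then '-' else x) := by
  rw [PySem.Chars.replace, if_neg (by simp)]
  simpa using pv_go_single c s [] s.length (le_refl _)

-- A's guarded replace step, on the character level, is always the pointwise map
theorem pv_step (s : String) (c : Char) :
    (if PySem.Str.isIn (String.ofList [c]) s then PySem.Str.replace s (String.ofList [c]) "-" else s).toList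
      = s.toList.map (fun x => if x = c then '-' else x) := by
  by_cases h : PySem.Str.isIn (String.ofList [c]) s = true
  · rw [if_pos h, PySem.Str.toList_replace]
    have h1 : (String.ofList [c]).toList = [c] := by simp
    have h2 : ("-" : String).toList = ['-'] := by decide
    rw [h1, h2, pv_replace_single]
  · rw [if_neg h]
    have hnmem : c ∉ s.toList := by
      intro hmem
      apply h
      rw [PySem.Str.isIn_iff_infix]
      obtain ⟨l1, l2, hl⟩ := List.append_of_mem hmem
      exact ⟨l1, l2, by simp [hl]⟩
    have hid : s.toList.map (fun x => if x = c then '-' else x) = s.toList.map id :=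
      List.map_congr_left (fun x hx => by
        have hne : x ≠ c := fun he => hnmem (he ▸ hx)
        simp [hne])
    rw [hid, List.map_id]

-- folding the step over a list of special chars not containing '-' is the combined map
theorem pv_fold (cs : List Char) (hd : '-' ∉ cs) (s : String) :
    (cs.foldl (fun mod_string character =>
      if PySem.Str.isIn (String.ofList [character]) mod_string then
        PySem.Str.replace mod_string (String.ofList [character]) "-"
      else mod_string) s).toList
      = s.toList.map (fun x => if x ∈ cs then '-' else x) := by
  induction cs generalizing s with
  | nil => simp
  | cons c t ih =>
      have hdt : '-' ∉ t := fun hh => hd (List.mem_cons_of_mem _ hh)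
      have hdc : ('-' : Char) ≠ c := fun hh => hd (hh ▸ List.mem_cons_self)
      rw [List.foldl_cons, ih hdt, pv_step]
      rw [List.map_map]
      apply List.map_congr_left
      intro x _
      by_cases hxc : x = c
      · subst hxc
        simp
      · by_cases hxt : x ∈ t <;> simp [hxc, hxt]

-- ===== VERDICT (by name: the statement is the Claim_ definition above) =====
theorem special_characters_spec : Claim_equal_special_characters := by
  intro a_string replace_character _
  unfold Spec_special_characters special_characters special_characters_alt
  simp only [List.foldl_cons, List.foldl_nil]
  have hA := pv_fold ("<>:'\"/\\|?!* ".toList) (by decide) a_string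
  apply String.ext
  rw [hA]
  simp only [String.toList_ofList]
  apply List.map_congr_left
  intro x _
  by_cases hx : x ∈ "<>:'\"/\\|?!* ".toList
  · rw [if_pos hx, if_pos]
    rw [PySem.Set.contains_iff]
    simpa [PySem.Set.mem_ofList] using hx
  · rw [if_neg hx, if_neg]
    intro hcon
    rw [PySem.Set.contains_iff] at hcon
    exact hx (by simpa [PySem.Set.mem_ofList] using hcon)
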